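-- pv_equiv track=rewrite | github.com/Girlorg143/finalyearproject | backend/routes/logistics.py | _alert_severity_bucket
-- ===== SOURCE A (Python) =====
-- def _alert_severity_bucket(alerts) -> str:
--     if not alerts:
--         return "Info"
--     sev_rank = {
--         "extreme": 4,
--         "severe": 3,
--         "high": 3,
--         "red": 3,
--         "orange": 2,
--         "moderate": 2,
--         "medium": 2,
--         "minor": 1,
--         "low": 1,
--         "yellow": 1,
--         "info": 0,
--         "unknown": 0,
--     }
--     top = 0
--     for a in alerts:
--         lvl = str(a.get("alertlevel", "")).strip().lower()
--         top = max(top, sev_rank.get(lvl, 0))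
--     if top >= 3:
--         return "High"
--     if top == 2:
--         return "Moderate"
--     if top == 1:
--         return "Minor"
--     return "Info"
-- ===== SOURCE B (Python) =====
-- def _alert_severity_bucket(alerts) -> str:
--     levels = {str(a.get("alertlevel", "")).strip().lower() for a in alerts}
--     if not levels.isdisjoint({"extreme", "severe", "high", "red"}):
--         return "High"
--     if not levels.isdisjoint({"orange", "moderate", "medium"}):
--         return "Moderate"
--     if not levels.isdisjoint({"minor", "low", "yellow"}):
--         return "Minor"
--     return "Info"
-- ===== Notes on version B (the rewrite author's own statement) =====
-- stated objective: idiomatic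
-- what changed: Replaces the numeric rank dictionary and running-max loop with a one-pass set of normalized levels tested against three priority groups by set disjointness in descending order.
import Mathlib
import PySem

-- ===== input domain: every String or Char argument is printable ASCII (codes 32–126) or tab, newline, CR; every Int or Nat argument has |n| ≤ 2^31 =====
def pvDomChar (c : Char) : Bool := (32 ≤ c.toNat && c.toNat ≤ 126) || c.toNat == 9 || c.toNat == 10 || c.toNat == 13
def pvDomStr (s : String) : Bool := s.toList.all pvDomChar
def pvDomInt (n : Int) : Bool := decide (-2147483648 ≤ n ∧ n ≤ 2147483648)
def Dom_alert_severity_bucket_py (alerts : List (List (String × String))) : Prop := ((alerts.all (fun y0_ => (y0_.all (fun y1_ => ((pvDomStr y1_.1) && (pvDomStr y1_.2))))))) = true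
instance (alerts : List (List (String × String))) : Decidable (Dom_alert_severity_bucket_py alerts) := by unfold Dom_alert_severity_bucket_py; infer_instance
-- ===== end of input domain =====

-- B replaces A's numeric rank dictionary and running-max loop with a set of normalized
-- levels tested against three priority groups by set disjointness, in descending order.


-- ===== PORT A =====
-- str(a.get("alertlevel","")).strip().lower(); the dict values are strings, so str() is the identity
def pvNorm (a : List (String × String)) : String :=
  PySem.Str.lower (PySem.Str.strip (PySem.Dict.getD ⟨a⟩ "alertlevel" ""))

-- the sev_rank dict literal
def pvSevRank : PySem.Dict String Int :=
  PySem.Dict.ofList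
  [("extreme", 4), ("severe", 3), ("high", 3), ("red", 3),
   ("orange", 2), ("moderate", 2), ("medium", 2),
   ("minor", 1), ("low", 1), ("yellow", 1), ("info", 0), ("unknown", 0)]

-- the running max 'top' of A's for-loop
def pvTop (alerts : List (List (String × String))) : Int :=
  alerts.foldl (fun top a => max top (PySem.Dict.getD pvSevRank (pvNorm a) 0)) 0

def alert_severity_bucket_py (alerts : List (List (String × String))) : String :=
  if alerts = [] then "Info"
  else if pvTop alerts ≥ 3 then "High"
  else if pvTop alerts = 2 then "Moderate"
  else if pvTop alerts = 1 then "Minor"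
  else "Info"

-- ===== PORT B =====
def alert_severity_bucket_py_alt (alerts : List (List (String × String))) : String :=
  let levels : PySem.Set String := PySem.Set.ofList (alerts.map pvNorm)
  if !(PySem.Set.isdisjoint levels (PySem.Set.ofList ["extreme", "severe", "high", "red"])) then "High"
  else if !(PySem.Set.isdisjoint levels (PySem.Set.ofList ["orange", "moderate", "medium"])) then "Moderate"
  else if !(PySem.Set.isdisjoint levels (PySem.Set.ofList ["minor", "low", "yellow"])) then "Minor"
  else "Info"

-- ===== PRECONDITION & SPEC =====
def Spec_alert_severity_bucket_py (alerts : List (List (String × String))) (out : String) : Prop := out = alert_severity_bucket_py_alt alerts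
instance (alerts : List (List (String × String))) (out : String) : Decidable (Spec_alert_severity_bucket_py alerts out) := by unfold Spec_alert_severity_bucket_py; infer_instance

-- ===== CLAIM (what is proved, stated in full; the proofs are below) =====
def Claim_equal_alert_severity_bucket_py : Prop := ∀ (alerts : List (List (String × String))), Dom_alert_severity_bucket_py alerts → Spec_alert_severity_bucket_py alerts (alert_severity_bucket_py alerts)

-- ===== LEMMAS AND PROOFS =====

-- the exact value of sev_rank.get(s, 0) as an if-chain over the twelve keys
lemma pvRank_eq (s : String) : PySem.Dict.getD pvSevRank s 0 =
    (if "extreme" = s then 4 else if "severe" = s then 3 else if "high" = s then 3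
     else if "red" = s then 3 else if "orange" = s then 2 else if "moderate" = s then 2
     else if "medium" = s then 2 else if "minor" = s then 1 else if "low" = s then 1
     else if "yellow" = s then 1 else 0 : Int) := by
  by_cases h1 : "extreme" = s;  · subst h1; decide
  by_cases h2 : "severe" = s;   · subst h2; decide
  by_cases h3 : "high" = s;     · subst h3; simp [h1, h2]; decide
  by_cases h4 : "red" = s;      · subst h4; simp [h1, h2, h3]; decide
  by_cases h5 : "orange" = s;   · subst h5; simp [h1, h2, h3, h4]; decide
  by_cases h6 : "moderate" = s; · subst h6; simp [h1, h2, h3, h4, h5]; decide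
  by_cases h7 : "medium" = s;   · subst h7; simp [h1, h2, h3, h4, h5, h6]; decide
  by_cases h8 : "minor" = s;    · subst h8; simp [h1, h2, h3, h4, h5, h6, h7]; decide
  by_cases h9 : "low" = s;      · subst h9; simp [h1, h2, h3, h4, h5, h6, h7, h8]; decide
  by_cases h10 : "yellow" = s;  · subst h10; simp [h1, h2, h3, h4, h5, h6, h7, h8, h9]; decide
  by_cases h11 : "info" = s;    · subst h11; simp [h1, h2, h3, h4, h5, h6, h7, h8, h9, h10]; decide
  by_cases h12 : "unknown" = s; · subst h12; simp [h1, h2, h3, h4, h5, h6, h7, h8, h9, h10]; decide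
  simp only [h1, h2, h3, h4, h5, h6, h7, h8, h9, h10, if_false]
  have hf : List.find? (fun p => p.1 == s) pvSevRank.items = none := by
    rw [List.find?_eq_none]
    intro x hx
    simp [pvSevRank, PySem.Dict.ofList, PySem.Dict.update, PySem.Dict.insert,
      PySem.Dict.empty, PySem.Dict.contains] at hx
    rcases hx with hx|hx|hx|hx|hx|hx|hx|hx|hx|hx|hx|hx <;> subst hx <;> simp_all
  simp [PySem.Dict.getD, PySem.Dict.get?, hf]

-- rank ≥ k iff the level lies in the union of the groups of rank ≥ k
lemma pvRank_ge3 (s : String) :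
    3 ≤ PySem.Dict.getD pvSevRank s 0 ↔ s ∈ ["extreme", "severe", "high", "red"] := by
  rw [pvRank_eq]; split_ifs <;> simp_all [eq_comm]

lemma pvRank_ge2 (s : String) :
    2 ≤ PySem.Dict.getD pvSevRank s 0 ↔
      s ∈ ["extreme", "severe", "high", "red"] ∨ s ∈ ["orange", "moderate", "medium"] := by
  rw [pvRank_eq]; split_ifs <;> simp_all [eq_comm]

lemma pvRank_ge1 (s : String) :
    1 ≤ PySem.Dict.getD pvSevRank s 0 ↔
      s ∈ ["extreme", "severe", "high", "red"] ∨ s ∈ ["orange", "moderate", "medium"]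
        ∨ s ∈ ["minor", "low", "yellow"] := by
  rw [pvRank_eq]; split_ifs <;> simp_all [eq_comm]

-- the running max is ≥ k iff the seed is, or some element's rank is
lemma pvFoldlMaxGe {α : Type} (f : α → Int) (k : Int) :
    ∀ (l : List α) (acc : Int),
      k ≤ l.foldl (fun t a => max t (f a)) acc ↔ k ≤ acc ∨ ∃ a ∈ l, k ≤ f a := by
  intro l
  induction l with
  | nil => simp
  | cons x t ih =>
    intro acc
    simp only [List.foldl_cons, ih, le_max_iff, List.mem_cons]
    constructor
    · rintro ((h | h) | ⟨a, ha, hk⟩)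
      · exact Or.inl h
      · exact Or.inr ⟨x, Or.inl rfl, h⟩
      · exact Or.inr ⟨a, Or.inr ha, hk⟩
    · rintro (h | ⟨a, (rfl | ha), hk⟩)
      · exact Or.inl (Or.inl h)
      · exact Or.inl (Or.inr hk)
      · exact Or.inr ⟨a, ha, hk⟩

-- B's disjointness test as an existential over the original alerts
lemma pvDisjChar (alerts : List (List (String × String))) (G : List String) :
    (!(PySem.Set.isdisjoint (PySem.Set.ofList (alerts.map pvNorm)) (PySem.Set.ofList G))) = true ↔
      ∃ a ∈ alerts, pvNorm a ∈ G := by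
  rw [Bool.not_eq_eq_eq_not, Bool.not_true, ← Bool.not_eq_true, PySem.Set.isdisjoint_iff]
  push Not
  constructor
  · rintro ⟨x, hx, hxG⟩
    rw [PySem.Set.mem_ofList] at hx hxG
    obtain ⟨a, ha, rfl⟩ := List.mem_map.mp hx
    exact ⟨a, ha, hxG⟩
  · rintro ⟨a, ha, hG⟩
    exact ⟨pvNorm a, (PySem.Set.mem_ofList _ _).mpr (List.mem_map_of_mem ha),
      (PySem.Set.mem_ofList _ _).mpr hG⟩

-- split a per-element disjunction of memberships into a disjunction of existentials
lemma pvExistsOr {α : Type} (l : List α) (p q : α → Prop) :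
    (∃ a ∈ l, p a ∨ q a) ↔ (∃ a ∈ l, p a) ∨ (∃ a ∈ l, q a) := by aesop

-- ===== VERDICT (by name: the statement is the Claim_ definition above) =====
theorem alert_severity_bucket_py_spec : Claim_equal_alert_severity_bucket_py := by
  intro alerts _
  unfold Spec_alert_severity_bucket_py
  by_cases hnil : alerts = []
  · subst hnil; decide
  have h3 : 3 ≤ pvTop alerts ↔ ∃ a ∈ alerts, pvNorm a ∈ ["extreme", "severe", "high", "red"] := by
    rw [pvTop, pvFoldlMaxGe]
    constructor
    · rintro (h | ⟨a, ha, h⟩)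
      · norm_num at h
      · exact ⟨a, ha, (pvRank_ge3 _).mp h⟩
    · rintro ⟨a, ha, h⟩; exact Or.inr ⟨a, ha, (pvRank_ge3 _).mpr h⟩
  have h2 : 2 ≤ pvTop alerts ↔
      (∃ a ∈ alerts, pvNorm a ∈ ["extreme", "severe", "high", "red"]) ∨
      (∃ a ∈ alerts, pvNorm a ∈ ["orange", "moderate", "medium"]) := by
    rw [pvTop, pvFoldlMaxGe, ← pvExistsOr]
    constructor
    · rintro (h | ⟨a, ha, h⟩)
      · norm_num at h
      · exact ⟨a, ha, (pvRank_ge2 _).mp h⟩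
    · rintro ⟨a, ha, h⟩; exact Or.inr ⟨a, ha, (pvRank_ge2 _).mpr h⟩
  have h1 : 1 ≤ pvTop alerts ↔
      (∃ a ∈ alerts, pvNorm a ∈ ["extreme", "severe", "high", "red"]) ∨
      (∃ a ∈ alerts, pvNorm a ∈ ["orange", "moderate", "medium"]) ∨
      (∃ a ∈ alerts, pvNorm a ∈ ["minor", "low", "yellow"]) := by
    rw [pvTop, pvFoldlMaxGe, ← pvExistsOr, ← pvExistsOr]
    constructor
    · rintro (h | ⟨a, ha, h⟩)
      · norm_num at h
      · exact ⟨a, ha, (pvRank_ge1 _).mp h⟩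
    · rintro ⟨a, ha, h⟩; exact Or.inr ⟨a, ha, (pvRank_ge1 _).mpr h⟩
  have h0 : 0 ≤ pvTop alerts := by rw [pvTop, pvFoldlMaxGe]; exact Or.inl le_rfl
  unfold alert_severity_bucket_py alert_severity_bucket_py_alt
  simp only [hnil, if_false]
  by_cases p3 : ∃ a ∈ alerts, pvNorm a ∈ ["extreme", "severe", "high", "red"]
  · rw [if_pos (h3.mpr p3), if_pos ((pvDisjChar alerts _).mpr p3)]
  · have hn3 : ¬ pvTop alerts ≥ 3 := fun h => p3 (h3.mp h)
    rw [if_neg hn3, if_neg (fun h => p3 ((pvDisjChar alerts _).mp h))]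
    by_cases p2 : ∃ a ∈ alerts, pvNorm a ∈ ["orange", "moderate", "medium"]
    · have ht2 : pvTop alerts = 2 := by
        have := h2.mpr (Or.inr p2); omega
      rw [if_pos ht2, if_pos ((pvDisjChar alerts _).mpr p2)]
    · have hn2 : ¬ pvTop alerts = 2 := fun h => (h2.mp (by omega)).elim p3 p2
      rw [if_neg hn2, if_neg (fun h => p2 ((pvDisjChar alerts _).mp h))]
      by_cases p1 : ∃ a ∈ alerts, pvNorm a ∈ ["minor", "low", "yellow"]
      · have ht1 : pvTop alerts = 1 := by
          have ha := h1.mpr (Or.inr (Or.inr p1))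
          have hb : ¬ 2 ≤ pvTop alerts := fun h => (h2.mp h).elim p3 p2
          omega
        rw [if_pos ht1, if_pos ((pvDisjChar alerts _).mpr p1)]
      · have hn1 : ¬ pvTop alerts = 1 := fun h =>
          (h1.mp (by omega)).elim p3 (fun h' => h'.elim p2 p1)
        rw [if_neg hn1, if_neg (fun h => p1 ((pvDisjChar alerts _).mp h))]
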